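-- pv_equiv track=rewrite | github.com/ankitshah009/leetcode_python | graphs/1943-describe_the_painting.py | splitPainting
-- ===== SOURCE A (Python) =====
-- from typing import List
-- from collections import defaultdict
--
-- def splitPainting(segments: List[List[int]]) -> List[List[int]]:
--     """
--     Same approach with clearer structure.
--
--     Key insight: use sum of colors as mix representation.
--     At each boundary point, color sum changes.
--     """
--     diff = defaultdict(int)
--
--     for start, end, color in segments:
--         diff[start] += color  # Add color at start
--         diff[end] -= color    # Remove color at end
--
--     sorted_points = sorted(diff.keys())
--     result = []
--     running_sum = 0
--
--     for i in range(len(sorted_points) - 1):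
--         running_sum += diff[sorted_points[i]]
--
--         # Only include painted segments
--         if running_sum > 0:
--             result.append([sorted_points[i], sorted_points[i + 1], running_sum])
--
--     return result
-- ===== SOURCE B (Python) =====
-- def splitPainting(segments):
--     points = set()
--     for s, e, _ in segments:
--         points.add(s)
--         points.add(e)
--     points = sorted(points)
--     result = []
--     for lo, hi in zip(points, points[1:]):
--         # signed coverage of lo: each segment contributes its color on [start, end)
--         mix = sum(c * ((s <= lo) - (e <= lo)) for s, e, c in segments)
--         if mix > 0:
--             result.append([lo, hi, mix])
--     return result
-- ===== Notes on version B (the rewrite author's own statement) =====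
-- stated objective: alternative
-- what changed: Replaces the difference-array/prefix-sweep (dict of per-point deltas, sorted keys, running sum carried across intervals) by independent per-interval recomputation: sort the distinct boundary points and, for each consecutive pair, re-scan all segments summing each segment's signed coverage of the interval's left endpoint.
import Mathlib
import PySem

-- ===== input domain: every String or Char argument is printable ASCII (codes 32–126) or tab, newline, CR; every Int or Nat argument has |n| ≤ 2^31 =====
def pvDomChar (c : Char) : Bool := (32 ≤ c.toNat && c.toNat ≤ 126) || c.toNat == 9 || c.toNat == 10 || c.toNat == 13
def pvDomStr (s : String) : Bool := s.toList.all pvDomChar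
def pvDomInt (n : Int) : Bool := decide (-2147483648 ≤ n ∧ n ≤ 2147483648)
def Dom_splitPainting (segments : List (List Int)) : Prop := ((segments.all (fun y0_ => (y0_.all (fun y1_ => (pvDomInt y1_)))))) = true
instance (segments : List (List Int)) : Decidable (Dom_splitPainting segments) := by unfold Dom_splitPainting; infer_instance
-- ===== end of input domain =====

-- B replaces A's difference-array + running-sum sweep by per-interval coverage summation
-- over the sorted distinct boundary points (an alternative algorithm, not claimed faster).

-- ===== PORT A =====
def splitPainting (segments : List (List Int)) : List (List Int) :=
  let diff : PySem.Dict Int Int := segments.foldl (fun d seg =>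
    match seg with
    | [s, e, c] => (d.modify s 0 (· + c)).modify e 0 (· - c)
    | _ => d) PySem.Dict.empty
  let sortedPoints := PySem.List.sorted diff.keys (fun x => x) false
  let final := (PySem.List.pyRange 0 ((sortedPoints.length : Int) - 1) 1).foldl
    (fun (st : Int × List (List Int)) i =>
      let rs := st.1 + diff.getD (PySem.List.pyGetD sortedPoints i 0) 0
      if rs > 0 then
        (rs, st.2 ++ [[PySem.List.pyGetD sortedPoints i 0, PySem.List.pyGetD sortedPoints (i + 1) 0, rs]])
      else (rs, st.2)) (0, [])
  final.2

-- ===== PORT B =====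
def splitPainting_alt (segments : List (List Int)) : List (List Int) :=
  let pset : PySem.Set Int := segments.foldl (fun st seg =>
    match seg with
    | [] => st
    | [_] => st
    | [_, _] => st
    | [s, e, _c] => PySem.Set.add (PySem.Set.add st s) e
    | _ :: _ :: _ :: _ :: _ => st) PySem.Set.empty
  let points := PySem.List.sorted pset (fun x => x) false
  (points.zip (PySem.List.slice points (some 1) none)).foldl (fun res p =>
    let mix : Int := segments.foldl (fun m seg =>
      match seg with
      | [] => m
      | [_] => m
      | [_, _] => m
      | [s, e, c] => m + c * ((if s ≤ p.1 then 1 else 0) - (if e ≤ p.1 then 1 else 0))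
      | _ :: _ :: _ :: _ :: _ => m) 0
    if mix > 0 then res ++ [[p.1, p.2, mix]] else res) []

-- ===== PRECONDITION & SPEC =====
-- Pre_ excludes exactly the rows that are not [start, end, color] triples: Python A raises
-- ValueError unpacking them.
def Pre_splitPainting (segments : List (List Int)) : Prop :=
  ∀ seg ∈ segments, seg.length = 3
instance (segments : List (List Int)) : Decidable (Pre_splitPainting segments) := by
  unfold Pre_splitPainting; infer_instance

def pvWitness_splitPainting : List (List Int) := [[1, 4, 5], [4, 7, 7], [1, 7, 9]]

def Spec_splitPainting (segments : List (List Int)) (out : List (List Int)) : Prop := out = splitPainting_alt segments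
instance (segments : List (List Int)) (out : List (List Int)) : Decidable (Spec_splitPainting segments out) := by unfold Spec_splitPainting; infer_instance

-- ===== CLAIM (what is proved, stated in full; the proofs are below) =====
def Claim_equal_splitPainting : Prop := ∀ (segments : List (List Int)), Dom_splitPainting segments → Pre_splitPainting segments → Spec_splitPainting segments (splitPainting segments)

-- ===== LEMMAS AND PROOFS =====

def pvDelta (segments : List (List Int)) (p : Int) : Int :=
  (segments.map (fun seg =>
    match seg with
    | [s, e, c] => (if s = p then c else 0) + (if e = p then -c else 0)
    | _ => 0)).sum

lemma pv_getD_diff (segments : List (List Int)) (d : PySem.Dict Int Int) (p : Int) :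
    (segments.foldl (fun d seg =>
      match seg with
      | [s, e, c] => (d.modify s 0 (· + c)).modify e 0 (· - c)
      | _ => d) d).getD p 0 = d.getD p 0 + pvDelta segments p := by
  induction segments generalizing d with
  | nil => simp [pvDelta]
  | cons seg rest ih =>
    rcases seg with _ | ⟨s, _ | ⟨e, _ | ⟨c, _ | ⟨x, t⟩⟩⟩⟩ <;>
      simp only [List.foldl_cons, ih, pvDelta, List.map_cons, List.sum_cons] <;>
      try omega
    simp only [PySem.Dict.getD_modify]
    split_ifs <;> subst_vars <;> simp_all <;> omega

theorem keys_insert_eq_add {ν : Type} (d : PySem.Dict Int ν) (k : Int) (v : ν) :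
    (d.insert k v).keys = PySem.Set.add d.keys k := by
  unfold PySem.Set.add
  by_cases h : d.contains k = true
  · rw [PySem.Dict.keys_insert_of_contains _ v h]
    rw [PySem.Dict.contains_eq_decide_mem_keys] at h
    simp only [decide_eq_true_eq] at h
    simp [PySem.Set.contains, List.contains_eq_mem, h]
  · rw [PySem.Dict.keys_insert_of_not_contains _ v (by simpa using h)]
    rw [PySem.Dict.contains_eq_decide_mem_keys] at h
    simp only [decide_eq_true_eq] at h
    simp [PySem.Set.contains, List.contains_eq_mem, h]

lemma pv_keys_diff (segments : List (List Int)) (d : PySem.Dict Int Int) :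
    (segments.foldl (fun d seg =>
      match seg with
      | [s, e, c] => (d.modify s 0 (· + c)).modify e 0 (· - c)
      | _ => d) d).keys =
    segments.foldl (fun st seg =>
      match seg with
      | [] => st
      | [_] => st
      | [_, _] => st
      | [s, e, _c] => PySem.Set.add (PySem.Set.add st s) e
      | _ :: _ :: _ :: _ :: _ => st) d.keys := by
  induction segments generalizing d with
  | nil => rfl
  | cons seg rest ih =>
    rcases seg with _ | ⟨s, _ | ⟨e, _ | ⟨c, _ | ⟨x, t⟩⟩⟩⟩ <;>
      simp only [List.foldl_cons, ih]
    rw [PySem.Dict.keys_modify, keys_insert_eq_add,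
        PySem.Dict.keys_modify, keys_insert_eq_add]

def pvPts (segments : List (List Int)) : List Int :=
  segments.flatMap (fun seg => match seg with | [s, e, _c] => [s, e] | _ => [])

lemma pv_set_eq_ofList (segments : List (List Int)) (st : PySem.Set Int) :
    segments.foldl (fun st seg =>
      match seg with
      | [] => st
      | [_] => st
      | [_, _] => st
      | [s, e, _c] => PySem.Set.add (PySem.Set.add st s) e
      | _ :: _ :: _ :: _ :: _ => st) st = PySem.Set.update st (pvPts segments) := by
  induction segments generalizing st with
  | nil => rfl
  | cons seg rest ih =>
    rcases seg with _ | ⟨s, _ | ⟨e, _ | ⟨c, _ | ⟨x, t⟩⟩⟩⟩ <;>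
      simp only [List.foldl_cons, ih, pvPts, List.flatMap_cons, PySem.Set.update,
        List.foldl_append, List.foldl_nil, List.foldl_cons]

lemma pv_range_fold_nat {β : Type} (S : List Int) (F : β → Int → Int → β) (init : β) :
    (List.range (S.length - 1)).foldl (fun st k => F st (S.getD k 0) (S.getD (k + 1) 0)) init
    = (S.zip S.tail).foldl (fun st p => F st p.1 p.2) init := by
  induction S generalizing init with
  | nil => rfl
  | cons x S' ih =>
    cases S' with
    | nil => rfl
    | cons y rest =>
      have hlen : (x :: y :: rest).length - 1 = rest.length + 1 := by simp
      rw [hlen, List.range_succ_eq_map, List.foldl_cons, List.foldl_map]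
      have := ih (init := F init x y)
      simp only [List.length_cons, Nat.add_sub_cancel] at this
      simpa using this

lemma pv_range_fold {β : Type} (S : List Int) (F : β → Int → Int → β) (init : β) :
    (PySem.List.pyRange 0 ((S.length : Int) - 1) 1).foldl
      (fun st i => F st (PySem.List.pyGetD S i 0) (PySem.List.pyGetD S (i + 1) 0)) init
    = (S.zip S.tail).foldl (fun st p => F st p.1 p.2) init := by
  rw [PySem.List.pyRange_one, List.foldl_map, ← pv_range_fold_nat S F init]
  have htn : ((S.length : Int) - 1 - 0).toNat = S.length - 1 := by omega
  rw [htn]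
  apply PySem.List.foldl_congr_mem
  intro st k hk
  have : ((0 : Int) + (k : Int)) = ((k : Nat) : Int) := by omega
  rw [this]
  have h2 : ((k : Nat) : Int) + 1 = ((k + 1 : Nat) : Int) := by omega
  rw [h2, PySem.List.pyGetD_natCast, PySem.List.pyGetD_natCast]

def pvCover (segments : List (List Int)) (lo : Int) : Int :=
  (segments.map (fun seg =>
    match seg with
    | [s, e, c] => c * ((if s ≤ lo then 1 else 0) - (if e ≤ lo then 1 else 0))
    | _ => 0)).sum

lemma pv_sum_swap {α β : Type} (P : List α) (L : List β) (f : β → α → Int) :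
    (P.map (fun x => (L.map (fun seg => f seg x)).sum)).sum
    = (L.map (fun seg => (P.map (fun x => f seg x)).sum)).sum := by
  induction P with
  | nil => simp
  | cons x P' ih =>
    simp only [List.map_cons, List.sum_cons, ih]
    rw [← PySem.List.sum_map_add_int]

lemma pv_sum_indicator (P : List Int) (hnd : P.Nodup) (a v : Int) :
    (P.map (fun x => if a = x then v else 0)).sum = if a ∈ P then v else 0 := by
  induction P with
  | nil => simp
  | cons x P' ih =>
    simp only [List.nodup_cons] at hnd
    simp only [List.map_cons, List.sum_cons, ih hnd.2, List.mem_cons]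
    by_cases hax : a = x
    · subst hax
      simp [hnd.1]
    · simp [hax]

lemma pv_prefix_eq_cover (segments : List (List Int)) (hpre : Pre_splitPainting segments)
    (S R T : List Int) (p : Int)
    (hS : S = R ++ p :: T)
    (hsorted : S.Pairwise (· < ·))
    (hmem : ∀ x ∈ pvPts segments, x ∈ S) :
    ((R ++ [p]).map (pvDelta segments)).sum = pvCover segments p := by
  subst hS
  have hndS : (R ++ p :: T).Nodup := hsorted.imp (fun h => ne_of_lt h)
  have hndP : (R ++ [p]).Nodup := by
    rw [List.append_cons] at hndS
    exact hndS.of_append_left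
  rw [List.pairwise_append] at hsorted
  obtain ⟨hr, hpt, hcross⟩ := hsorted
  rw [List.pairwise_cons] at hpt
  obtain ⟨hpb, _⟩ := hpt
  have hPle : ∀ x ∈ R ++ [p], x ≤ p := by
    intro x hx
    rcases List.mem_append.mp hx with hx | hx
    · exact le_of_lt (hcross x hx p (by simp))
    · simp at hx; omega
  have hmemle : ∀ x, x ∈ R ++ p :: T → x ≤ p → x ∈ R ++ [p] := by
    intro x hx hle
    rcases List.mem_append.mp hx with hx | hx
    · exact List.mem_append.mpr (Or.inl hx)
    · rcases List.mem_cons.mp hx with hx | hx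
      · subst hx; simp
      · exact absurd (hpb x hx) (by omega)
  have h1 : ((R ++ [p]).map (pvDelta segments)).sum
      = (segments.map (fun seg => ((R ++ [p]).map (fun x =>
          (match seg with
           | [s, e, c] => (if s = x then c else 0) + (if e = x then -c else 0)
           | _ => (0 : Int)))).sum)).sum :=
    pv_sum_swap (R ++ [p]) segments _
  rw [h1]
  unfold pvCover
  apply congrArg List.sum
  apply List.map_congr_left
  intro seg hseg
  have hlen := hpre seg hseg
  rcases seg with _ | ⟨s, _ | ⟨e, _ | ⟨c, _ | ⟨x, t⟩⟩⟩⟩ <;> simp at hlen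
  -- now seg = [s, e, c]
  have hsS : s ∈ R ++ p :: T := by
    apply hmem; unfold pvPts; rw [List.mem_flatMap]; exact ⟨[s, e, c], hseg, by simp⟩
  have heS : e ∈ R ++ p :: T := by
    apply hmem; unfold pvPts; rw [List.mem_flatMap]; exact ⟨[s, e, c], hseg, by simp⟩
  have hmatch : ((R ++ [p]).map (fun x =>
      (match [s, e, c] with
       | [s, e, c] => (if s = x then c else 0) + (if e = x then -c else 0)
       | _ => (0 : Int)))).sum
      = ((R ++ [p]).map (fun x => (if s = x then c else 0) + (if e = x then -c else 0))).sum := rfl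
  rw [hmatch, PySem.List.sum_map_add_int, pv_sum_indicator _ hndP s c, pv_sum_indicator _ hndP e (-c)]
  have hs : s ∈ R ++ [p] ↔ s ≤ p := ⟨hPle s, hmemle s hsS⟩
  have he : e ∈ R ++ [p] ↔ e ≤ p := ⟨hPle e, hmemle e heS⟩
  by_cases hsp : s ≤ p <;> by_cases hep : e ≤ p
  · simp [hs.mpr hsp, he.mpr hep, hsp, hep]
  · have heP : e ∉ R ++ [p] := fun h => hep (he.mp h)
    simp [hs.mpr hsp, heP, hsp, hep]
  · have hsP : s ∉ R ++ [p] := fun h => hsp (hs.mp h)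
    simp [hsP, he.mpr hep, hsp, hep]
  · have hsP : s ∉ R ++ [p] := fun h => hsp (hs.mp h)
    have heP : e ∉ R ++ [p] := fun h => hep (he.mp h)
    simp [hsP, heP, hsp, hep]

lemma pv_loop_eq (segments : List (List Int)) (S : List Int)
    (hcov : ∀ R p T, S = R ++ p :: T →
      ((R ++ [p]).map (pvDelta segments)).sum = pvCover segments p) :
    ∀ (T R : List Int) (rs : Int) (res : List (List Int)), S = R ++ T →
      rs = (R.map (pvDelta segments)).sum →
      ((T.zip T.tail).foldl (fun st p =>
        if st.1 + pvDelta segments p.1 > 0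
        then (st.1 + pvDelta segments p.1, st.2 ++ [[p.1, p.2, st.1 + pvDelta segments p.1]])
        else (st.1 + pvDelta segments p.1, st.2)) (rs, res)).2
      = (T.zip T.tail).foldl (fun res p =>
          if pvCover segments p.1 > 0
          then res ++ [[p.1, p.2, pvCover segments p.1]] else res) res := by
  intro T
  induction T with
  | nil => intro R rs res _ _; rfl
  | cons p T' ih =>
    intro R rs res hSeq hrs
    cases T' with
    | nil => rfl
    | cons q T'' =>
      simp only [List.tail_cons, List.zip_cons_cons, List.foldl_cons]
      have hcv : rs + pvDelta segments p = pvCover segments p := by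
        rw [hrs, ← hcov R p (q :: T'') (by simpa using hSeq)]
        simp
      rw [hcv]
      have hrs2 : pvCover segments p = ((R ++ [p]).map (pvDelta segments)).sum :=
        (hcov R p (q :: T'') (by simpa using hSeq)).symm
      have hS2 : S = (R ++ [p]) ++ (q :: T'') := by simpa using hSeq
      by_cases hpos : pvCover segments p > 0
      · rw [if_pos hpos, if_pos hpos]
        exact ih (R ++ [p]) (pvCover segments p) _ hS2 hrs2
      · rw [if_neg hpos, if_neg hpos]
        exact ih (R ++ [p]) (pvCover segments p) _ hS2 hrs2

lemma pv_mix_eq (segments : List (List Int)) (lo : Int) : ∀ (m : Int),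
    segments.foldl (fun m seg =>
      match seg with
      | [] => m
      | [_] => m
      | [_, _] => m
      | [s, e, c] => m + c * ((if s ≤ lo then 1 else 0) - (if e ≤ lo then 1 else 0))
      | _ :: _ :: _ :: _ :: _ => m) m = m + pvCover segments lo := by
  induction segments with
  | nil => intro m; simp [pvCover]
  | cons seg rest ih =>
    intro m
    rcases seg with _ | ⟨s, _ | ⟨e, _ | ⟨c, _ | ⟨x, t⟩⟩⟩⟩ <;>
      simp only [List.foldl_cons, ih, pvCover, List.map_cons, List.sum_cons] <;> ring

lemma pv_A_eq (segments : List (List Int)) :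
    splitPainting segments =
    ((let S := PySem.List.sorted (PySem.Set.ofList (pvPts segments)) (fun x => x) false
      (S.zip S.tail).foldl (fun st p =>
        if st.1 + pvDelta segments p.1 > 0
        then (st.1 + pvDelta segments p.1, st.2 ++ [[p.1, p.2, st.1 + pvDelta segments p.1]])
        else (st.1 + pvDelta segments p.1, st.2)) ((0 : Int), ([] : List (List Int)))) : Int × List (List Int)).2 := by
  simp only [splitPainting]
  rw [pv_keys_diff, PySem.Dict.keys_empty, pv_set_eq_ofList, PySem.Set.update_nil_left]
  set S := PySem.List.sorted (PySem.Set.ofList (pvPts segments)) (fun x => x) false with hSdef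
  rw [pv_range_fold (β := Int × List (List Int)) S
      (fun st a b =>
        if st.1 + (segments.foldl (fun d seg =>
            match seg with
            | [s, e, c] => (d.modify s 0 (· + c)).modify e 0 (· - c)
            | _ => d) PySem.Dict.empty).getD a 0 > 0
        then (st.1 + (segments.foldl (fun d seg =>
            match seg with
            | [s, e, c] => (d.modify s 0 (· + c)).modify e 0 (· - c)
            | _ => d) PySem.Dict.empty).getD a 0,
              st.2 ++ [[a, b, st.1 + (segments.foldl (fun d seg =>
            match seg with
            | [s, e, c] => (d.modify s 0 (· + c)).modify e 0 (· - c)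
            | _ => d) PySem.Dict.empty).getD a 0]])
        else (st.1 + (segments.foldl (fun d seg =>
            match seg with
            | [s, e, c] => (d.modify s 0 (· + c)).modify e 0 (· - c)
            | _ => d) PySem.Dict.empty).getD a 0, st.2)) ((0 : Int), ([] : List (List Int)))]
  have hfun : (fun (st : Int × List (List Int)) (p : Int × Int) =>
        if st.1 + (segments.foldl (fun d seg =>
            match seg with
            | [s, e, c] => (d.modify s 0 (· + c)).modify e 0 (· - c)
            | _ => d) PySem.Dict.empty).getD p.1 0 > 0
        then (st.1 + (segments.foldl (fun d seg =>
            match seg with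
            | [s, e, c] => (d.modify s 0 (· + c)).modify e 0 (· - c)
            | _ => d) PySem.Dict.empty).getD p.1 0,
              st.2 ++ [[p.1, p.2, st.1 + (segments.foldl (fun d seg =>
            match seg with
            | [s, e, c] => (d.modify s 0 (· + c)).modify e 0 (· - c)
            | _ => d) PySem.Dict.empty).getD p.1 0]])
        else (st.1 + (segments.foldl (fun d seg =>
            match seg with
            | [s, e, c] => (d.modify s 0 (· + c)).modify e 0 (· - c)
            | _ => d) PySem.Dict.empty).getD p.1 0, st.2))
      = (fun (st : Int × List (List Int)) (p : Int × Int) =>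
        if st.1 + pvDelta segments p.1 > 0
        then (st.1 + pvDelta segments p.1, st.2 ++ [[p.1, p.2, st.1 + pvDelta segments p.1]])
        else (st.1 + pvDelta segments p.1, st.2)) := by
    funext st p
    rw [pv_getD_diff, PySem.Dict.getD_empty, zero_add]
  rw [hfun]

lemma pv_B_eq (segments : List (List Int)) :
    splitPainting_alt segments =
    (let S := PySem.List.sorted (PySem.Set.ofList (pvPts segments)) (fun x => x) false
     (S.zip S.tail).foldl (fun res p =>
        if pvCover segments p.1 > 0
        then res ++ [[p.1, p.2, pvCover segments p.1]] else res) ([] : List (List Int))) := by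
  simp only [splitPainting_alt]
  rw [pv_set_eq_ofList, PySem.Set.update_empty]
  have hslice : ∀ (xs : List Int), PySem.List.slice xs (some 1) none = xs.tail := by
    intro xs; simp [pysem]
  rw [hslice]
  have hfun : (fun (res : List (List Int)) (p : Int × Int) =>
      if (segments.foldl (fun m seg =>
          match seg with
          | [] => m
          | [_] => m
          | [_, _] => m
          | [s, e, c] => m + c * ((if s ≤ p.1 then 1 else 0) - (if e ≤ p.1 then 1 else 0))
          | _ :: _ :: _ :: _ :: _ => m) (0 : Int)) > 0
      then res ++ [[p.1, p.2, (segments.foldl (fun m seg =>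
          match seg with
          | [] => m
          | [_] => m
          | [_, _] => m
          | [s, e, c] => m + c * ((if s ≤ p.1 then 1 else 0) - (if e ≤ p.1 then 1 else 0))
          | _ :: _ :: _ :: _ :: _ => m) (0 : Int))]] else res)
      = (fun (res : List (List Int)) (p : Int × Int) =>
        if pvCover segments p.1 > 0
        then res ++ [[p.1, p.2, pvCover segments p.1]] else res) := by
    funext res p
    rw [pv_mix_eq, zero_add]
  rw [hfun]

lemma pv_main (segments : List (List Int)) (hpre : Pre_splitPainting segments) :
    splitPainting segments = splitPainting_alt segments := by
  rw [pv_A_eq, pv_B_eq]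
  simp only []
  set S := PySem.List.sorted (PySem.Set.ofList (pvPts segments)) (fun x => x) false with hSdef
  have hsorted : S.Pairwise (· < ·) := PySem.List.sorted_ofList_pairwise_lt _
  have hmem : ∀ x ∈ pvPts segments, x ∈ S := by
    intro x hx
    rw [hSdef, PySem.List.mem_sorted, PySem.Set.mem_ofList]
    exact hx
  exact pv_loop_eq segments S
    (fun R p T hEq => pv_prefix_eq_cover segments hpre S R T p hEq hsorted hmem)
    S [] 0 [] (by simp) (by simp)

-- ===== VERDICT (by name: the statement is the Claim_ definition above) =====
theorem splitPainting_spec : Claim_equal_splitPainting := by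
  intro segments _hdom hpre
  unfold Spec_splitPainting
  exact pv_main segments hpre
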